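-- pv_equiv track=rewrite | github.com/cmc9595/ACM-Study-2021 | 11주차_Season_2/sim/4.py | solution
-- ===== SOURCE A (Python) =====
-- import heapq
--
-- def solution(food_times, k):
--     answer = -1
--     queue = []
--     x, y = 0, 0
--
--     for i in food_times:
--         heapq.heappush(queue, i)
--
--     while queue:
--         x = heapq.heappop(queue)
--
--         if k >= (x - y) * (len(queue) + 1):
--             k = k - ((x - y) * (len(queue) + 1))
--             y = x
--         else:
--             break
--
--     r = k % (len(queue) + 1)
--
--     for i in range(len(food_times)):
--         if food_times[i] > y:
--             r = r - 1
--             if r < 0: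
--                 answer = i + 1
--                 break
--
--     return answer
-- ===== SOURCE B (Python) =====
-- def solution(food_times, k):
--     ts = sorted(food_times)
--     n = len(ts)
--     pref = [0]
--     for t in ts:
--         pref.append(pref[-1] + t)
--
--     def cost(i):
--         # total seconds consumed when the baseline has been raised to ts[i-1]
--         return pref[i] + (n - i) * ts[i - 1]
--
--     # cost is nondecreasing on i in [1, n], so binary-search the largest
--     # fully-affordable baseline index lo (0 = no level completed).
--     lo, hi = 0, n
--     while lo < hi:
--         mid = (lo + hi + 1) // 2
--         if cost(mid) <= k:
--             lo = mid
--         else: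
--             hi = mid - 1
--     if lo == n:
--         return -1
--     y = ts[lo - 1] if lo > 0 else 0
--     r = (k - cost(lo) if lo > 0 else k) % (n - lo)
--     for idx, t in enumerate(food_times):
--         if t > y:
--             if r == 0:
--                 return idx + 1
--             r -= 1
--     return -1
-- ===== Notes on version B (the rewrite author's own statement) =====
-- stated objective: faster
-- what changed: Replaces A's sequential heap-pop consumption loop (n heappush/heappop operations) with prefix sums over the sorted times and a binary search for the last fully-affordable baseline level (valid because the cumulative cost is monotone on sorted data), then returns the r-th surviving food by an early-return scan.
import Mathlib
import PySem

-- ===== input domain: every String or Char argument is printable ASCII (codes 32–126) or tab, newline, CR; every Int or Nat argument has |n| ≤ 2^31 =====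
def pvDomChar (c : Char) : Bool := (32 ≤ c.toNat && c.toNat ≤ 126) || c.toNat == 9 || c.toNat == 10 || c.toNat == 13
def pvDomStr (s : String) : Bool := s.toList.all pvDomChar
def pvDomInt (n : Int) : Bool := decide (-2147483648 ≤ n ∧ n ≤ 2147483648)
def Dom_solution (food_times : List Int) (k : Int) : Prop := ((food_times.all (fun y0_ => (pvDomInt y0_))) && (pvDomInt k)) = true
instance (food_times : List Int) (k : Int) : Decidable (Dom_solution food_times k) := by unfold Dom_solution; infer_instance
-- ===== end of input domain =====

-- B replaces A's sequential heap-pop consumption loop by prefix sums over the sorted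
-- times plus a binary search for the last fully-affordable baseline level (alternative).

-- ===== PORT A =====
-- heapq on Int is modelled as a sorted list: heappush = ordered insert, heappop = take the
-- head; this is exact w.r.t. heapq's observable behaviour on ints (pops in nondecreasing order).
def heappush (q : List Int) (i : Int) : List Int := List.orderedInsert (· ≤ ·) i q

-- the 'while queue' loop; returns (k, y, len(queue)+1) at exit (break or exhaustion)
def loopA : List Int → Int → Int → Int × Int × Int
  | [], k, y => (k, y, 1)
  | x :: rest, k, y =>
    if (x - y) * ((rest.length : Int) + 1) ≤ k then
      loopA rest (k - (x - y) * ((rest.length : Int) + 1)) x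
    else (k, y, (rest.length : Int) + 1)

-- the final 'for i in range(len(food_times))' scan over enumerated foods
def scanA : List (Int × Int) → Int → Int → Int
  | [], _, _ => -1
  | (i, t) :: rest, y, r =>
    if y < t then
      (if r - 1 < 0 then i + 1 else scanA rest y (r - 1))
    else scanA rest y r

def solution (food_times : List Int) (k : Int) : Int :=
  let queue := food_times.foldl heappush []
  let res := loopA queue k 0
  scanA (PySem.List.enumerate food_times) res.2.1 (PySem.Int.mod res.1 res.2.2)

-- ===== PORT B =====
-- pref = [0]; for t in ts: pref.append(pref[-1] + t)   (pref[-1] is the running sum s)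
def prefLoop : List Int → Int → List Int
  | [], _ => []
  | t :: rest, s => (s + t) :: prefLoop rest (s + t)

-- cost(i) = pref[i] + (n - i) * ts[i-1]; only called with 1 ≤ i ≤ n, so plain
-- in-range indexing (getD with an unused default) is exact here
def costB (ts pref : List Int) (i : Nat) : Int :=
  pref.getD i 0 + ((ts.length : Int) - (i : Int)) * ts.getD (i - 1) 0

-- the while lo < hi binary-search loop (mid = (lo+hi+1)//2 written inline)
def bsearchB (ts pref : List Int) (k : Int) (lo hi : Nat) : Nat :=
  if lo < hi then
    if costB ts pref ((lo + hi + 1) / 2) ≤ k then bsearchB ts pref k ((lo + hi + 1) / 2) hi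
    else bsearchB ts pref k lo ((lo + hi + 1) / 2 - 1)
  else lo
termination_by hi - lo
decreasing_by all_goals omega

-- the final early-return scan of Source B
def scanB : List (Int × Int) → Int → Int → Int
  | [], _, _ => -1
  | (idx, t) :: rest, y, r =>
    if y < t then (if r = 0 then idx + 1 else scanB rest y (r - 1))
    else scanB rest y r

def solution_alt (food_times : List Int) (k : Int) : Int :=
  let ts := PySem.List.sorted food_times (fun x => x) false
  let n := ts.length
  let pref := 0 :: prefLoop ts 0
  let lo := bsearchB ts pref k 0 n
  if lo = n then -1
  else
    let y := if 0 < lo then ts.getD (lo - 1) 0 else 0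
    let r := PySem.Int.mod (if 0 < lo then k - costB ts pref lo else k) ((n : Int) - (lo : Int))
    scanB (PySem.List.enumerate food_times) y r

-- ===== PRECONDITION & SPEC =====
def Spec_solution (food_times : List Int) (k : Int) (out : Int) : Prop := out = solution_alt food_times k
instance (food_times : List Int) (k : Int) (out : Int) : Decidable (Spec_solution food_times k out) := by unfold Spec_solution; infer_instance

-- ===== CLAIM (what is proved, stated in full; the proofs are below) =====
def Claim_equal_solution : Prop := ∀ (food_times : List Int) (k : Int), Dom_solution food_times k → Spec_solution food_times k (solution food_times k)

-- ===== LEMMAS AND PROOFS =====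

-- proof-side characterisation of A's pop loop: Srel q y i = cost of the first i pops,
-- Yrel q y i = baseline after the first i pops
def Srel : List Int → Int → Nat → Int
  | _, _, 0 => 0
  | [], _, _+1 => 0
  | t :: rest, y, i+1 => (t - y) * ((rest.length : Int) + 1) + Srel rest t i

def Yrel : List Int → Int → Nat → Int
  | _, y, 0 => y
  | [], y, _+1 => y
  | t :: rest, _, i+1 => Yrel rest t i

theorem loopA_char (q : List Int) : ∀ (k y : Int) (i : Nat), i ≤ q.length →
    (∀ j, 1 ≤ j → j ≤ i → Srel q y j ≤ k) →
    (i < q.length → ¬ Srel q y (i+1) ≤ k) →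
    loopA q k y = (k - Srel q y i, Yrel q y i,
      if i = q.length then 1 else ((q.length : Int) - (i : Int))) := by
  induction q with
  | nil =>
    intro k y i hi _ _
    have : i = 0 := by simpa using hi
    subst this
    simp [loopA, Srel, Yrel]
  | cons t rest ih =>
    intro k y i hi hall hbrk
    cases i with
    | zero =>
      have hcost : ¬ Srel (t :: rest) y 1 ≤ k := hbrk (by simp)
      have h1 : Srel (t :: rest) y 1 = (t - y) * ((rest.length : Int) + 1) := by
        simp [Srel]
      rw [h1] at hcost
      rw [loopA, if_neg hcost]
      simp only [Srel, Yrel, Prod.mk.injEq, List.length_cons]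
      refine ⟨by ring, trivial, ?_⟩
      rw [if_neg (by omega)]
      push_cast
      ring
    | succ m =>
      have h1 : Srel (t :: rest) y 1 ≤ k := hall 1 le_rfl (by omega)
      have hc : Srel (t :: rest) y 1 = (t - y) * ((rest.length : Int) + 1) := by
        simp [Srel]
      rw [hc] at h1
      rw [loopA, if_pos h1]
      rw [ih (k - (t - y) * ((rest.length : Int) + 1)) t m (by simpa using hi)
        (fun j hj1 hj2 => by
          have := hall (j+1) (by omega) (by omega)
          simp only [Srel] at this
          omega)
        (fun hm => by
          have := hbrk (by simpa using hm)
          simp only [Srel] at this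
          omega)]
      have hS : Srel (t :: rest) y (m+1) = (t - y) * ((rest.length : Int) + 1) + Srel rest t m := rfl
      have hY : Yrel (t :: rest) y (m+1) = Yrel rest t m := rfl
      rw [hS, hY]
      simp only [Prod.mk.injEq, List.length_cons]
      refine ⟨by ring, trivial, ?_⟩
      by_cases hm : m = rest.length
      · rw [if_pos hm, if_pos (by omega)]
      · rw [if_neg hm, if_neg (by omega)]
        push_cast
        ring
  

theorem srel_closed (q : List Int) : ∀ (y : Int) (i : Nat), 1 ≤ i → i ≤ q.length →
    Srel q y i = (q.take i).sum + ((q.length : Int) - (i : Int)) * q.getD (i-1) 0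
      - (q.length : Int) * y := by
  induction q with
  | nil => intro y i h1 h2; simp at h2; omega
  | cons t rest ih =>
    intro y i h1 h2
    match i, h1 with
    | 1, _ =>
      simp [Srel, List.take]
      ring
    | (m+2), _ =>
      have hih := ih t (m+1) (by omega) (by simpa using h2)
      have hS : Srel (t :: rest) y (m+2) = (t - y) * ((rest.length : Int) + 1) + Srel rest t (m+1) := rfl
      rw [hS, hih]
      have htake : ((t :: rest).take (m+2)).sum = t + (rest.take (m+1)).sum := by simp
      have hgd : (t :: rest).getD (m+2-1) 0 = rest.getD (m+1-1) 0 := by simp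
      rw [htake, hgd]
      simp only [List.length_cons]
      push_cast
      ring
  

theorem yrel_eq (q : List Int) : ∀ (y : Int) (i : Nat), 1 ≤ i → i ≤ q.length →
    Yrel q y i = q.getD (i-1) 0 := by
  induction q with
  | nil => intro y i h1 h2; simp at h2; omega
  | cons t rest ih =>
    intro y i h1 h2
    match i, h1 with
    | 1, _ => simp [Yrel]
    | (m+2), _ =>
      have : Yrel (t :: rest) y (m+2) = Yrel rest t (m+1) := rfl
      rw [this, ih t (m+1) (by omega) (by simpa using h2)]
      simp
  

theorem srel_step_mono (q : List Int) (hs : q.Pairwise (· ≤ ·)) (i : Nat)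
    (h1 : 1 ≤ i) (h2 : i + 1 ≤ q.length) : Srel q 0 i ≤ Srel q 0 (i+1) := by
  rw [srel_closed q 0 i h1 (by omega), srel_closed q 0 (i+1) (by omega) h2]
  have hi : i < q.length := by omega
  have hi1 : i - 1 < q.length := by omega
  have htake : (q.take (i+1)).sum = (q.take i).sum + q[i] := List.sum_take_succ q i hi
  have hg1 : q.getD (i-1) 0 = q[i-1] := List.getD_eq_getElem q 0 hi1
  have hg2 : q.getD (i+1-1) 0 = q[i] := by
    simp only [Nat.add_sub_cancel]
    exact List.getD_eq_getElem q 0 hi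
  have hle : q[i-1] ≤ q[i] := by
    have := List.pairwise_iff_getElem.mp hs (i-1) i hi1 hi (by omega)
    exact this
  rw [htake, hg1, hg2]
  have hnn : (0 : Int) ≤ ((q.length : Int) - (i : Int)) * (q[i] - q[i-1]) :=
    mul_nonneg (by omega) (by omega)
  push_cast
  nlinarith [hnn]
  

theorem srel_mono (q : List Int) (hs : q.Pairwise (· ≤ ·)) (i j : Nat)
    (h1 : 1 ≤ i) (hij : i ≤ j) (hj : j ≤ q.length) : Srel q 0 i ≤ Srel q 0 j := by
  induction j, hij using Nat.le_induction with
  | base => exact le_rfl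
  | succ j hij ih =>
    exact (ih (by omega)).trans (srel_step_mono q hs j (by omega) hj)
  

theorem prefLoop_getD (q : List Int) : ∀ (s : Int) (j : Nat), j < q.length →
    (prefLoop q s).getD j 0 = s + (q.take (j+1)).sum := by
  induction q with
  | nil => intro s j hj; simp at hj
  | cons t rest ih =>
    intro s j hj
    cases j with
    | zero => simp [prefLoop]
    | succ m =>
      simp only [prefLoop, List.getD_cons_succ]
      rw [ih (s+t) m (by simpa using hj)]
      simp
      ring
  

theorem cost_eq_srel (q : List Int) (i : Nat) (h1 : 1 ≤ i) (h2 : i ≤ q.length) :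
    costB q (0 :: prefLoop q 0) i = Srel q 0 i := by
  rw [srel_closed q 0 i h1 h2]
  unfold costB
  obtain ⟨m, rfl⟩ : ∃ m, i = m + 1 := ⟨i-1, by omega⟩
  rw [List.getD_cons_succ, prefLoop_getD q 0 m (by omega)]
  ring
  

theorem bsearchB_props (ts pref : List Int) (k : Int) (n : Nat) :
    ∀ (d lo hi : Nat), hi - lo ≤ d → lo ≤ hi → hi ≤ n →
    (lo = 0 ∨ costB ts pref lo ≤ k) → (hi < n → ¬ costB ts pref (hi+1) ≤ k) →
    (bsearchB ts pref k lo hi ≤ n ∧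
      (bsearchB ts pref k lo hi = 0 ∨ costB ts pref (bsearchB ts pref k lo hi) ≤ k) ∧
      (bsearchB ts pref k lo hi < n → ¬ costB ts pref (bsearchB ts pref k lo hi + 1) ≤ k)) := by
  intro d
  induction d with
  | zero =>
    intro lo hi hd hlh hhn hlo hhi
    obtain rfl : hi = lo := by omega
    rw [bsearchB, if_neg (by omega)]
    exact ⟨hhn, hlo, hhi⟩
  | succ d ih =>
    intro lo hi hd hlh hhn hlo hhi
    rw [bsearchB]
    by_cases h : lo < hi
    · rw [if_pos h]
      by_cases hg : costB ts pref ((lo + hi + 1) / 2) ≤ k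
      · rw [if_pos hg]
        exact ih ((lo + hi + 1) / 2) hi (by omega) (by omega) hhn (Or.inr hg) hhi
      · rw [if_neg hg]
        refine ih lo ((lo + hi + 1) / 2 - 1) (by omega) (by omega) (by omega) hlo ?_
        intro _
        have : (lo + hi + 1) / 2 - 1 + 1 = (lo + hi + 1) / 2 := by omega
        rw [this]
        exact hg
    · rw [if_neg h]
      obtain rfl : hi = lo := by omega
      exact ⟨hhn, hlo, hhi⟩
  

theorem mem_le_yrel (q : List Int) (hs : q.Pairwise (· ≤ ·)) (a : Int) (ha : a ∈ q) :
    a ≤ Yrel q 0 q.length := by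
  have hq : q ≠ [] := by rintro rfl; simp at ha
  have hlen : 1 ≤ q.length := List.length_pos_of_ne_nil hq
  rw [yrel_eq q 0 q.length hlen le_rfl]
  obtain ⟨j, hj, rfl⟩ := List.mem_iff_getElem.mp ha
  rw [List.getD_eq_getElem q 0 (by omega)]
  by_cases hje : j = q.length - 1
  · subst hje; exact le_rfl
  · exact List.pairwise_iff_getElem.mp hs j (q.length - 1) hj (by omega) (by omega)
  

theorem scan_all_le (l : List (Int × Int)) (y r : Int)
    (h : ∀ p ∈ l, p.2 ≤ y) : scanA l y r = -1 := by
  induction l generalizing r with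
  | nil => rfl
  | cons p rest ih =>
    obtain ⟨i, t⟩ := p
    have hyt : ¬ y < t := by have := h (i, t) (by simp); simp at this; omega
    simp only [scanA, if_neg hyt]
    exact ih _ (fun p hp => h p (by simp [hp]))
  

theorem scan_eq (l : List (Int × Int)) : ∀ (y r : Int), 0 ≤ r → scanA l y r = scanB l y r := by
  induction l with
  | nil => intro y r _; rfl
  | cons p rest ih =>
    intro y r hr
    obtain ⟨i, t⟩ := p
    simp only [scanA, scanB]
    by_cases hyt : y < t
    · rw [if_pos hyt, if_pos hyt]
      by_cases hr0 : r = 0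
      · subst hr0
        rw [if_pos (by omega), if_pos rfl]
      · rw [if_neg (by omega), if_neg hr0]
        exact ih y (r-1) (by omega)
    · rw [if_neg hyt, if_neg hyt]
      exact ih y r hr
  

theorem foldl_heappush_sorted (l : List Int) (acc : List Int) (h : acc.Pairwise (· ≤ ·)) :
    (l.foldl heappush acc).Pairwise (· ≤ ·) := by
  induction l generalizing acc with
  | nil => exact h
  | cons a l ih => exact ih _ (List.Pairwise.orderedInsert a acc h)

theorem foldl_heappush_perm (l : List Int) (acc : List Int) :
    (l.foldl heappush acc).Perm (acc ++ l) := by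
  induction l generalizing acc with
  | nil => simp
  | cons a l ih =>
    refine (ih _).trans ?_
    refine ((List.perm_orderedInsert _ a acc).append_right l).trans ?_
    exact List.perm_middle.symm

-- ===== VERDICT (by name: the statement is the Claim_ definition above) =====
theorem solution_spec : Claim_equal_solution := by
  intro food k _
  show solution food k = solution_alt food k
  have hsort : (food.foldl heappush []).Pairwise (· ≤ ·) :=
    foldl_heappush_sorted food [] (by simp)
  have hperm : (food.foldl heappush []).Perm food := by
    simpa using foldl_heappush_perm food []
  have hts : PySem.List.sorted food (fun x => x) false = food.foldl heappush [] :=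
    PySem.List.sorted_id_eq_of_perm_of_pairwise _ _ hperm hsort
  simp only [solution, solution_alt, hts]
  set q := food.foldl heappush [] with hq
  set pref := (0 : Int) :: prefLoop q 0 with hpref
  set i := bsearchB q pref k 0 q.length with hidef
  obtain ⟨hin, hgood, hbad⟩ :=
    bsearchB_props q pref k q.length q.length 0 q.length (by omega) (by omega) le_rfl
      (Or.inl rfl) (fun h => absurd h (lt_irrefl q.length))
  have hall : ∀ j, 1 ≤ j → j ≤ i → Srel q 0 j ≤ k := by
    intro j h1 h2
    rcases hgood with h0 | hg
    · omega
    · have hik : Srel q 0 i ≤ k := by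
        rw [← cost_eq_srel q i (by omega) hin, ← hpref]
        exact hg
      exact le_trans (srel_mono q hsort j i h1 h2 hin) hik
  have hbrk : i < q.length → ¬ Srel q 0 (i+1) ≤ k := by
    intro h
    rw [← cost_eq_srel q (i+1) (by omega) (by omega), ← hpref]
    exact hbad h
  have hA := loopA_char q k 0 i hin hall hbrk
  rw [hA]
  dsimp only
  by_cases hcase : i = q.length
  · rw [hcase, if_pos rfl, if_pos rfl]
    apply scan_all_le
    intro p hp
    rcases (PySem.List.mem_enumerate_iff _ _ _).mp hp with ⟨j, hj, rfl⟩
    exact mem_le_yrel q hsort _ (hperm.mem_iff.mpr (List.getElem_mem hj))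
  · rw [if_neg hcase, if_neg hcase]
    have hilt : i < q.length := lt_of_le_of_ne hin hcase
    have hy : (if 0 < i then q.getD (i-1) 0 else 0) = Yrel q 0 i := by
      by_cases h0 : 0 < i
      · rw [if_pos h0, yrel_eq q 0 i h0 hin]
      · have h00 : i = 0 := by omega
        rw [if_neg h0, h00]
        simp [Yrel]
    have hr : (if 0 < i then k - costB q pref i else k) = k - Srel q 0 i := by
      by_cases h0 : 0 < i
      · rw [if_pos h0, hpref, cost_eq_srel q i h0 hin]
      · have h00 : i = 0 := by omega
        rw [if_neg h0, h00]
        simp [Srel]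
    rw [hy, hr]
    apply scan_eq
    exact PySem.Int.mod_nonneg _ (by omega)
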